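-- pv_equiv track=rewrite | github.com/jones3kd/Cracking_The_Coding_Interview | ch1/1.1.py | hasUniqueChar
-- ===== SOURCE A (Python) =====
-- def hasUniqueChar(sentence):
--
--     dic = {}
--     words = sentence.split()
--
--     for word in words:
--         for char in word:
--             if char not in dic:
--                 dic[char] = 1
--             else:
--                 return False
--
--     return True
-- ===== SOURCE B (Python) =====
-- def hasUniqueChar(sentence):
--     chars = sorted(''.join(sentence.split()))
--     return all(x < y for x, y in zip(chars, chars[1:]))
-- ===== Notes on version B (the rewrite author's own statement) =====
-- stated objective: alternative
-- what changed: Replaces the incrementally built hash dict with its early-exit nested loops by sorting the joined non-whitespace characters and scanning adjacent pairs for a strict increase (sort-then-scan instead of hash-membership).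
import Mathlib
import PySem

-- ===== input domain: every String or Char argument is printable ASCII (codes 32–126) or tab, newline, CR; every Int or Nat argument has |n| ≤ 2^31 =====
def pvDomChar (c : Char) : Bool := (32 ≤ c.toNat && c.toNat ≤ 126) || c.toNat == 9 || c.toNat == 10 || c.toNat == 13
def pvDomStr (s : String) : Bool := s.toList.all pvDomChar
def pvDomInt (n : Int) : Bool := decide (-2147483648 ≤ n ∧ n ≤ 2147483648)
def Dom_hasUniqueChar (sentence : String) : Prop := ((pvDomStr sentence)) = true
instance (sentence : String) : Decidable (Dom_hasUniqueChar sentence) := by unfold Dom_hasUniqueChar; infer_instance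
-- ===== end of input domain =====

-- B re-implements the uniqueness check by sorting the joined non-whitespace characters and
-- scanning adjacent pairs for a strict increase (sort-then-scan instead of A's hash dict with early exit).


-- ===== PORT A =====
-- inner loop 'for char in word: if char not in dic: dic[char]=1 else: return False'
-- (none = the early 'return False')
def hucWord (dic : PySem.Dict Char Int) (cs : List Char) : Option (PySem.Dict Char Int) :=
  match cs with
  | [] => some dic
  | c :: rest =>
      if dic.contains c = false then hucWord (dic.insert c 1) rest else none

-- outer loop 'for word in words: …', threading the dict, propagating the early return
def hucWords (dic : PySem.Dict Char Int) (ws : List String) : Bool :=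
  match ws with
  | [] => true
  | w :: rest =>
      match hucWord dic w.toList with
      | none => false
      | some d => hucWords d rest

def hasUniqueChar (sentence : String) : Bool :=
  hucWords PySem.Dict.empty (PySem.Str.split₀ sentence)

-- ===== PORT B =====
-- chars = sorted(''.join(sentence.split())); all(x < y for x, y in zip(chars, chars[1:]))
-- (chars[1:] on a list is exactly List.tail)
def hasUniqueChar_alt (sentence : String) : Bool :=
  let chars := PySem.List.sorted (PySem.Str.join "" (PySem.Str.split₀ sentence)).toList (fun c => c) false
  (chars.zip chars.tail).all (fun p => p.1 < p.2)

-- ===== PRECONDITION & SPEC =====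
def Spec_hasUniqueChar (sentence : String) (out : Bool) : Prop := out = hasUniqueChar_alt sentence
instance (sentence : String) (out : Bool) : Decidable (Spec_hasUniqueChar sentence out) := by unfold Spec_hasUniqueChar; infer_instance

-- ===== CLAIM (what is proved, stated in full; the proofs are below) =====
def Claim_equal_hasUniqueChar : Prop := ∀ (sentence : String), Dom_hasUniqueChar sentence → Spec_hasUniqueChar sentence (hasUniqueChar sentence)

-- ===== LEMMAS AND PROOFS =====

-- A's inner loop succeeds iff the word's chars are fresh and pairwise distinct,
-- and then the resulting dict is the left fold of inserts
theorem hucWord_eq (cs : List Char) (d : PySem.Dict Char Int) :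
    hucWord d cs =
      if cs.Nodup ∧ ∀ c ∈ cs, d.contains c = false
      then some (cs.foldl (fun d c => d.insert c 1) d) else none := by
  induction cs generalizing d with
  | nil => simp [hucWord]
  | cons c rest ih =>
    by_cases hc : d.contains c = false
    · rw [hucWord, if_pos hc, ih]
      by_cases hr : rest.Nodup ∧ ∀ x ∈ rest, (d.insert c 1).contains x = false
      · rw [if_pos hr, if_pos]
        · simp
        · refine ⟨List.nodup_cons.mpr ⟨?_, hr.1⟩, ?_⟩
          · intro hmem
            have := hr.2 c hmem
            simp at this
          · intro x hx
            rcases List.mem_cons.mp hx with h | h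
            · exact h ▸ hc
            · have := hr.2 x h
              simp [PySem.Dict.contains_insert] at this
              exact this.2
      · rw [if_neg hr, if_neg]
        intro ⟨hnd, hall⟩
        apply hr
        refine ⟨(List.nodup_cons.mp hnd).2, ?_⟩
        intro x hx
        have hxc : x ≠ c := fun h => (List.nodup_cons.mp hnd).1 (h ▸ hx)
        simp [PySem.Dict.contains_insert, hxc, hall x (List.mem_cons_of_mem _ hx)]
    · rw [hucWord, if_neg hc, if_neg]
      intro ⟨_, hall⟩
      exact hc (hall c (List.mem_cons_self))

-- membership in the dict after a word's inserts
theorem contains_foldl_insert (cs : List Char) (d : PySem.Dict Char Int) (x : Char) :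
    ((cs.foldl (fun d c => d.insert c 1) d).contains x) = (d.contains x || decide (x ∈ cs)) := by
  rw [PySem.Dict.contains_eq_decide_mem_keys, PySem.Dict.contains_eq_decide_mem_keys]
  rw [PySem.Dict.keys_foldl_insert cs (fun _ _ => (1 : Int)) d]
  simp [PySem.Set.mem_update]

-- A's outer loop decides nodup-ness of the words' concatenated characters, relative to the dict
theorem hucWords_eq (ws : List String) (d : PySem.Dict Char Int) :
    hucWords d ws =
      decide ((ws.flatMap String.toList).Nodup ∧
              ∀ c ∈ ws.flatMap String.toList, d.contains c = false) := by
  induction ws generalizing d with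
  | nil => simp [hucWords]
  | cons w rest ih =>
    rw [hucWords, hucWord_eq]
    by_cases hw : w.toList.Nodup ∧ ∀ c ∈ w.toList, d.contains c = false
    · rw [if_pos hw]
      show hucWords (w.toList.foldl (fun d c => d.insert c 1) d) rest = _
      rw [ih]
      by_cases hr : (rest.flatMap String.toList).Nodup ∧
          ∀ c ∈ rest.flatMap String.toList,
            ((w.toList.foldl (fun d c => d.insert c 1) d).contains c) = false
      · rw [decide_eq_true hr, Eq.comm, decide_eq_true_eq]
        constructor
        · rw [List.flatMap_cons, List.nodup_append]
          refine ⟨hw.1, hr.1, ?_⟩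
          intro x hx y hy hxy
          have := hr.2 y hy
          rw [contains_foldl_insert] at this
          simp at this
          exact this.2 (hxy ▸ hx)
        · intro c hc
          rw [List.flatMap_cons, List.mem_append] at hc
          rcases hc with h | h
          · exact hw.2 c h
          · have := hr.2 c h
            rw [contains_foldl_insert] at this
            simp at this
            exact this.1
      · rw [decide_eq_false hr, Eq.comm, decide_eq_false_iff_not]
        intro ⟨hnd, hall⟩
        apply hr
        rw [List.flatMap_cons, List.nodup_append] at hnd
        refine ⟨hnd.2.1, ?_⟩
        intro c hc
        rw [contains_foldl_insert]
        have h1 : d.contains c = false := hall c (by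
          rw [List.flatMap_cons, List.mem_append]; right; exact hc)
        have h2 : c ∉ w.toList := fun hcw => hnd.2.2 c hcw c hc rfl
        simp [h1, h2]
    · rw [if_neg hw, Eq.comm, decide_eq_false_iff_not]
      intro ⟨hnd, hall⟩
      apply hw
      rw [List.flatMap_cons, List.nodup_append] at hnd
      exact ⟨hnd.1, fun c hc => hall c (by
        rw [List.flatMap_cons, List.mem_append]; left; exact hc)⟩

-- ''.join on char lists is flatten
theorem join_nil_flatten (xss : List (List Char)) : PySem.Chars.join [] xss = xss.flatten := by
  show [].intercalate xss = xss.flatten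
  induction xss with
  | nil => rfl
  | cons h t ih => cases t <;> simp_all [List.intercalate, List.intersperse]

-- the adjacent-pairs scan decides that the list is a strict chain
theorem zip_all_lt (l : List Char) :
    ((l.zip l.tail).all (fun p => p.1 < p.2)) = decide (l.IsChain (· < ·)) := by
  induction l with
  | nil => simp
  | cons a t ih =>
    cases t with
    | nil => simp
    | cons b t' =>
      simp only [List.tail_cons, List.zip_cons_cons, List.all_cons, List.isChain_cons_cons]
      rw [show ((b :: t').zip t' = (b :: t').zip (b :: t').tail) from rfl, ih]
      simp

-- on a (≤)-sorted list, a strict adjacent chain is exactly Nodup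
theorem pairwise_lt_iff_nodup (l : List Char) (hs : l.Pairwise (· ≤ ·)) :
    l.Pairwise (· < ·) ↔ l.Nodup := by
  constructor
  · exact fun h => h.imp ne_of_lt
  · intro hnd
    exact (hs.and hnd).imp (fun ⟨hle, hne⟩ => lt_of_le_of_ne hle hne)

-- ===== VERDICT (by name: the statement is the Claim_ definition above) =====
theorem hasUniqueChar_spec : Claim_equal_hasUniqueChar := by
  intro s _
  show hasUniqueChar s = hasUniqueChar_alt s
  unfold hasUniqueChar hasUniqueChar_alt
  rw [hucWords_eq]
  simp only [PySem.Dict.contains_empty, implies_true, and_true]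
  set L := (PySem.Str.join "" (PySem.Str.split₀ s)).toList with hLdef
  have hL : L = (PySem.Str.split₀ s).flatMap String.toList := by
    rw [hLdef, PySem.Str.toList_join]
    show PySem.Chars.join "".toList _ = _
    rw [show "".toList = ([] : List Char) from rfl, join_nil_flatten, List.flatMap]
  rw [← hL, zip_all_lt]
  have hperm : (PySem.List.sorted L (fun c => c) false).Perm L := PySem.List.sorted_perm L _ _
  have hsorted : (PySem.List.sorted L (fun c => c) false).Pairwise (· ≤ ·) :=
    PySem.List.sorted_pairwise L (fun c => c)
  rw [show (decide ((PySem.List.sorted L (fun c => c) false).IsChain (· < ·)))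
      = decide ((PySem.List.sorted L (fun c => c) false).Pairwise (· < ·)) by
    simp only [decide_eq_decide]; exact List.isChain_iff_pairwise]
  simp only [decide_eq_decide]
  rw [pairwise_lt_iff_nodup _ hsorted]
  exact (hperm.nodup_iff).symm
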